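-- pv_equiv track=rewrite | github.com/Talknura/Nura | app/semantic/memory_architecture.py | _extract_fact_value
-- ===== SOURCE A (Python) =====
-- def _extract_fact_value(text: str) -> str:
--     """
--     Extract the fact value from text.
--     For now, we store the full statement as the value.
--     The key provides the category, the value is the full context.
--     """
--     # Clean up the text
--     value = text.strip()
--
--     # Remove common prefixes that don't add value
--     prefixes_to_remove = [
--         "by the way,", "just so you know,", "oh,", "well,",
--         "actually,", "you know,", "i mean,"
--     ]
--     value_lower = value.lower()
--     for prefix in prefixes_to_remove:
--         if value_lower.startswith(prefix):
--             value = value[len(prefix):].strip()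
--             break
--
--     return value
-- ===== SOURCE B (Python) =====
-- _FILLERS = {
--     "by the way,", "just so you know,", "oh,", "well,",
--     "actually,", "you know,", "i mean,"
-- }
--
-- def _extract_fact_value(text: str) -> str:
--     # One find of the first comma + a set lookup, instead of a per-prefix startswith loop:
--     # every filler prefix ends at its only comma, so a leading filler must end exactly at
--     # the first comma of the stripped text.
--     value = text.strip()
--     i = value.find(",")
--     if i != -1 and value[: i + 1].lower() in _FILLERS:
--         value = value[i + 1:].strip()
--     return value
-- ===== Notes on version B (the rewrite author's own statement) =====
-- stated objective: alternative
-- what changed: B drops A's per-prefix startswith loop: since every filler prefix ends at its only comma, B finds the first comma of the stripped text once and checks the lowered head slice up to it against a set of fillers.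
import Mathlib
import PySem

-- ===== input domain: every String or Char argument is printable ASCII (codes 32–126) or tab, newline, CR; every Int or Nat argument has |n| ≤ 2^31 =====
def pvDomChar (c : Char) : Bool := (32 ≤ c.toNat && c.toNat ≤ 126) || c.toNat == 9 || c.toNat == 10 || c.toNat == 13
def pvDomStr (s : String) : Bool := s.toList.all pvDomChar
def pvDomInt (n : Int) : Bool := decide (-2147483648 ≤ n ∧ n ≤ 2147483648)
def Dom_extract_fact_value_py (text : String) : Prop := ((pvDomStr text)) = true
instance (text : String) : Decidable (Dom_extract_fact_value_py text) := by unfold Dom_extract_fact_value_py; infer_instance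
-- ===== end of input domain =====

-- B replaces A's per-prefix startswith loop by one find of the first comma plus a set lookup
-- (every filler prefix ends at its only comma); objective: alternative, same cost.

-- ===== PORT A =====
def aPrefixes : List String :=
  ["by the way,", "just so you know,", "oh,", "well,",
   "actually,", "you know,", "i mean,"]

def aLoop (value value_lower : String) : List String → String
  | [] => value
  | p :: ps =>
    if PySem.Str.startswith value_lower p then
      PySem.Str.strip (PySem.Str.slice value (some (PySem.Str.len p)) none)
    else aLoop value value_lower ps

def extract_fact_value_py (text : String) : String :=
  let value := PySem.Str.strip text
  let value_lower := PySem.Str.lower value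
  aLoop value value_lower aPrefixes

-- ===== PORT B =====
def bFillers : PySem.Set String :=
  PySem.Set.ofList
    ["by the way,", "just so you know,", "oh,", "well,",
     "actually,", "you know,", "i mean,"]

def extract_fact_value_py_alt (text : String) : String :=
  let value := PySem.Str.strip text
  let i := PySem.Str.find value ","
  if i ≠ -1 ∧ bFillers.contains (PySem.Str.lower (PySem.Str.slice value none (some (i + 1)))) then
    PySem.Str.strip (PySem.Str.slice value (some (i + 1)) none)
  else value

-- ===== PRECONDITION & SPEC =====
def Spec_extract_fact_value_py (text : String) (out : String) : Prop := out = extract_fact_value_py_alt text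
instance (text : String) (out : String) : Decidable (Spec_extract_fact_value_py text out) := by unfold Spec_extract_fact_value_py; infer_instance

-- ===== CLAIM (what is proved, stated in full; the proofs are below) =====
def Claim_equal_extract_fact_value_py : Prop := ∀ (text : String), Dom_extract_fact_value_py text → Spec_extract_fact_value_py text (extract_fact_value_py text)

-- ===== LEMMAS AND PROOFS =====

theorem singleton_prefix_iff (c : Char) (t : List Char) : [c] <+: t ↔ t.head? = some c := by
  cases t <;> simp [eq_comm]

-- find of a single character lands on the first position holding it
theorem find_comma (l : List Char) (n : Nat) (h1 : l[n]? = some ',')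
    (h2 : ∀ j < n, l[j]? ≠ some ',') : PySem.Chars.find l [','] = (n : Int) := by
  have hpref : [','] <+: l.drop n := by
    rw [singleton_prefix_iff, List.head?_drop]; exact h1
  have hinf : [','] <:+: l := hpref.isInfix.trans (List.drop_suffix n l).isInfix
  have hne : PySem.Chars.find l [','] ≠ -1 := (PySem.Chars.find_ne_neg_one_iff l [',']).mpr hinf
  have hge : -1 ≤ PySem.Chars.find l [','] := PySem.Chars.neg_one_le_find l [',']
  have hnn : 0 ≤ PySem.Chars.find l [','] := by omega
  obtain ⟨hp, hmin⟩ := PySem.Chars.find_spec hnn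
  set k := (PySem.Chars.find l [',']).toNat with hk
  have hkc : l[k]? = some ',' := by
    rw [← List.head?_drop, ← singleton_prefix_iff]; exact hp
  rcases lt_trichotomy k n with h | h | h
  · exact absurd hkc (h2 k h)
  · omega
  · exact absurd hpref (hmin n h)

theorem lowerChar_eq_comma_iff (c : Char) : PySem.Chars.lowerChar c = ',' ↔ c = ',' := by
  unfold PySem.Chars.lowerChar PySem.Chars.isupper
  split_ifs with h
  · simp only [Bool.and_eq_true, decide_eq_true_eq] at h
    obtain ⟨h1, h2⟩ := h
    rw [Char.le_def] at h1 h2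
    have hA : (65 : Nat) ≤ c.toNat := h1
    have hZ : c.toNat ≤ 90 := h2
    constructor
    · intro he
      have h3 := congrArg Char.toNat he
      rw [Char.toNat_ofNat] at h3
      rw [if_pos (Or.inl (by omega : c.toNat + 32 < 0xd800))] at h3
      have hc : (','.toNat) = 44 := rfl
      omega
    · intro he; subst he; exact absurd hA (by decide)
  · exact Iff.rfl

-- comma positions agree between l and lower l
theorem getElem?_lower_comma (l : List Char) (j : Nat) :
    (PySem.Chars.lower l)[j]? = some ',' ↔ l[j]? = some ',' := by
  unfold PySem.Chars.lower
  rw [List.getElem?_map]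
  cases h : l[j]? with
  | none => simp
  | some c => simp [lowerChar_eq_comma_iff]

-- a matching filler prefix pins down the first comma of v and the lowered head slice
theorem B_of_match (v p : String) (hne : p.toList ≠ [])
    (hlast : p.toList.getLast hne = ',')
    (hnc : ∀ j < p.toList.length - 1, p.toList[j]? ≠ some ',')
    (hpre : p.toList <+: PySem.Chars.lower v.toList) :
    PySem.Str.find v "," = (p.toList.length : Int) - 1 ∧
    PySem.Str.lower (PySem.Str.slice v none (some ((p.toList.length : Int) - 1 + 1))) = p := by
  set l := v.toList with hl
  set m := PySem.Chars.lower l with hm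
  set q := p.toList.dropLast with hq
  have hsplit : q ++ [','] = p.toList := by rw [hq, ← hlast]; exact List.dropLast_append_getLast hne
  have hlen : p.toList.length = q.length + 1 := by rw [← hsplit]; simp
  obtain ⟨t, ht⟩ := hpre
  have hmq : m = q ++ (',' :: t) := by rw [← ht, ← hsplit]; simp
  have hmc : m[q.length]? = some ',' := by
    rw [hmq, List.getElem?_append_right (le_refl _)]; simp
  have hlc : l[q.length]? = some ',' := (getElem?_lower_comma l q.length).mp hmc
  have hlnc : ∀ j < q.length, l[j]? ≠ some ',' := by
    intro j hj hcon
    have hmj : m[j]? = some ',' := (getElem?_lower_comma l j).mpr hcon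
    rw [hmq, List.getElem?_append_left hj] at hmj
    have : p.toList[j]? = some ',' := by
      rw [← hsplit, List.getElem?_append_left hj]; exact hmj
    exact hnc j (by omega) this
  have hfind : PySem.Chars.find l [','] = (q.length : Int) := find_comma l q.length hlc hlnc
  constructor
  · rw [PySem.Str.find_eq]
    have : (",".toList) = [','] := rfl
    rw [this, ← hl, hfind, hlen]; push_cast; ring
  · apply String.toList_inj.mp
    rw [PySem.Str.toList_lower, PySem.Str.toList_slice]
    have hb : ((p.toList.length : Int) - 1 + 1) = ((q.length + 1 : Nat) : Int) := by rw [hlen]; push_cast; ring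
    rw [hb, PySem.Chars.slice_eq_listSlice, PySem.List.slice_to _ (by positivity)]
    have htoNat : (((q.length + 1 : Nat) : Int)).toNat = q.length + 1 := by omega
    rw [htoNat]
    have hlow : PySem.Chars.lower (List.take (q.length + 1) l) = List.take (q.length + 1) m := by
      rw [hm]; unfold PySem.Chars.lower; rw [List.map_take]
    rw [hlow, hmq]
    have h1 : q.length + 1 = (q ++ [',']).length := by simp
    rw [h1]
    have h2 : q ++ (',' :: t) = (q ++ [',']) ++ t := by simp
    rw [h2, List.take_left, hsplit]

theorem bFillers_eq : bFillers = ["by the way,", "just so you know,", "oh,", "well,",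
    "actually,", "you know,", "i mean,"] := by decide

set_option maxHeartbeats 1000000 in
theorem case_true (text p : String) (hmem : bFillers.contains p = true)
    (hne : p.toList ≠ []) (hlast : p.toList.getLast hne = ',')
    (hnc : ∀ j < p.toList.length - 1, p.toList[j]? ≠ some ',')
    (hsw : PySem.Str.startswith (PySem.Str.lower (PySem.Str.strip text)) p = true) :
    PySem.Str.strip (PySem.Str.slice (PySem.Str.strip text) (some (PySem.Str.len p)) none)
      = extract_fact_value_py_alt text := by
  simp only [extract_fact_value_py_alt]
  set v := PySem.Str.strip text with hv
  have hpre : p.toList <+: PySem.Chars.lower v.toList := by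
    rw [PySem.Str.startswith_eq, PySem.Chars.startswith_iff, PySem.Str.toList_lower] at hsw
    exact hsw
  obtain ⟨hfind, hlow⟩ := B_of_match v p hne hlast hnc hpre
  rw [hfind, hlow]
  have hpos : 0 < p.toList.length := List.length_pos_iff.mpr hne
  rw [if_pos ⟨by omega, hmem⟩]
  have h1 : ((p.toList.length : Int) - 1 + 1) = PySem.Str.len p := by rw [PySem.Str.len_eq]; ring
  rw [h1]

theorem case_false (text : String)
    (hall : ∀ p ∈ bFillers, PySem.Str.startswith (PySem.Str.lower (PySem.Str.strip text)) p = false) :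
    PySem.Str.strip text = extract_fact_value_py_alt text := by
  simp only [extract_fact_value_py_alt]
  split_ifs with h
  · exfalso
    obtain ⟨hne, hcont⟩ := h
    generalize hgen : PySem.Str.lower (PySem.Str.slice (PySem.Str.strip text) none
      (some (PySem.Str.find (PySem.Str.strip text) "," + 1))) = p at hcont
    have hge : -1 ≤ PySem.Str.find (PySem.Str.strip text) "," := by
      rw [PySem.Str.find_eq]; exact PySem.Chars.neg_one_le_find _ _
    have h0 : (0:Int) ≤ PySem.Str.find (PySem.Str.strip text) "," + 1 := by omega
    have hmem : p ∈ bFillers := List.contains_iff_mem.mp hcont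
    have hswp : PySem.Str.startswith (PySem.Str.lower (PySem.Str.strip text)) p = true := by
      rw [PySem.Str.startswith_eq, PySem.Chars.startswith_iff, ← hgen, PySem.Str.toList_lower,
        PySem.Str.toList_lower, PySem.Str.toList_slice, PySem.Chars.slice_eq_listSlice,
        PySem.List.slice_to _ h0]
      unfold PySem.Chars.lower
      rw [List.map_take]
      exact List.take_prefix _ _
    have hfalse := hall p hmem
    rw [hswp] at hfalse
    exact absurd hfalse (by simp)
  · rfl

set_option maxHeartbeats 1000000 in
theorem main_eq (text : String) : extract_fact_value_py text = extract_fact_value_py_alt text := by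
  simp only [extract_fact_value_py, aPrefixes, aLoop]
  split_ifs with h1 h2 h3 h4 h5 h6 h7
  · exact case_true text "by the way," (by decide) (by decide) (by decide) (by decide) h1
  · exact case_true text "just so you know," (by decide) (by decide) (by decide) (by decide) h2
  · exact case_true text "oh," (by decide) (by decide) (by decide) (by decide) h3
  · exact case_true text "well," (by decide) (by decide) (by decide) (by decide) h4
  · exact case_true text "actually," (by decide) (by decide) (by decide) (by decide) h5
  · exact case_true text "you know," (by decide) (by decide) (by decide) (by decide) h6
  · exact case_true text "i mean," (by decide) (by decide) (by decide) (by decide) h7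
  · apply case_false
    intro p hp
    rw [bFillers_eq] at hp
    simp only [List.mem_cons, List.not_mem_nil, or_false] at hp
    rcases hp with rfl | rfl | rfl | rfl | rfl | rfl | rfl
    · exact Bool.eq_false_iff.mpr h1
    · exact Bool.eq_false_iff.mpr h2
    · exact Bool.eq_false_iff.mpr h3
    · exact Bool.eq_false_iff.mpr h4
    · exact Bool.eq_false_iff.mpr h5
    · exact Bool.eq_false_iff.mpr h6
    · exact Bool.eq_false_iff.mpr h7

-- ===== VERDICT (by name: the statement is the Claim_ definition above) =====
theorem extract_fact_value_py_spec : Claim_equal_extract_fact_value_py := by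
  intro text _
  unfold Spec_extract_fact_value_py
  exact main_eq text
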